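-- pv_equiv track=rewrite | github.com/rafaelc-rb/OCA | event_scheduler.py | process_room_availabilities
-- ===== SOURCE A (Python) =====
-- def process_room_availabilities(rooms):
--     """
--     Processa as disponibilidades das salas para obter os horários disponíveis.
--
--     Args:
--         rooms (list): Lista de dicionários contendo informações das salas.
--
--     Returns:
--         dict: Dicionário com os horários disponíveis por sala.
--     """
--     room_available_times = {}
--     for idx_r, room in enumerate(rooms):
--         available_times = set()
--         for interval in room['availability']:
--             start, end = interval
--             times_in_interval = list(range(start, end))
--             available_times.update(times_in_interval)
--         room_available_times[idx_r] = sorted(available_times)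
--     return room_available_times
-- ===== SOURCE B (Python) =====
-- def process_room_availabilities(rooms):
--     """Same result as A: per room index, the sorted distinct time points of the
--     availability intervals; computed by sorting the non-empty intervals by start
--     and sweeping/merging them, emitting each disjoint merged block's points in
--     order (no set, no final sort)."""
--     room_available_times = {}
--     for idx_r, room in enumerate(rooms):
--         intervals = sorted(
--             [iv for iv in room['availability'] if iv[0] < iv[1]],
--             key=lambda iv: iv[0],
--         )
--         points = []
--         if intervals:
--             cur_s, cur_e = intervals[0]
--             for s, e in intervals[1:]:
--                 if s <= cur_e:
--                     if e > cur_e: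
--                         cur_e = e
--                 else:
--                     points.extend(range(cur_s, cur_e))
--                     cur_s, cur_e = s, e
--             points.extend(range(cur_s, cur_e))
--         room_available_times[idx_r] = points
--     return room_available_times
-- ===== Notes on version B (the rewrite author's own statement) =====
-- stated objective: alternative
-- what changed: A collects every time point of every interval into a set and sorts it; B filters out empty intervals, sorts the intervals by start, merges overlapping/adjacent ones in one sweep and emits the points of the disjoint merged blocks, already distinct and in order, with no set and no point-level sort.
import Mathlib
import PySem

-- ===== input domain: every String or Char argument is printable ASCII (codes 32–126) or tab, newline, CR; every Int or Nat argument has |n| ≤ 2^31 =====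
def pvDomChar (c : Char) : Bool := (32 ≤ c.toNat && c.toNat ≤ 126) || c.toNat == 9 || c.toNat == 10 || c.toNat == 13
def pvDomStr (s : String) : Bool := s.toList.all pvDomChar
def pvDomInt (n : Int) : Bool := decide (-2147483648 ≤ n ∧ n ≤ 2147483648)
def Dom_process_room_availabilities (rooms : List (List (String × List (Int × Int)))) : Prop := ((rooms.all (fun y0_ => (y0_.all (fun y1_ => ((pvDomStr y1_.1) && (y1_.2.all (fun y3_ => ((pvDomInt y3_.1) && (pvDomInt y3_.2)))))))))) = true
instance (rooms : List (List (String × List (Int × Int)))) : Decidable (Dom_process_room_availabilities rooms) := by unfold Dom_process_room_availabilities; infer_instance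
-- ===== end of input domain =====

-- B replaces A's per-point set accumulation plus final sort by sorting the non-empty
-- intervals by start and sweeping/merging them, emitting the points already in order.

-- ===== PORT A =====
-- room['availability'] (the Python dict lookup; Pre_ guarantees the key exists)
def pvAvail (room : List (String × List (Int × Int))) : List (Int × Int) :=
  (PySem.Dict.ofList room).getD "availability" []

-- A's inner loop: available_times = set(); for interval: update(range(start,end)); sorted(...)
def pvRoomA (avail : List (Int × Int)) : List Int :=
  PySem.List.sorted
    (avail.foldl (fun st iv => PySem.Set.update st (PySem.List.pyRange iv.1 iv.2 1)) PySem.Set.empty)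
    (fun x => x) false

def process_room_availabilities (rooms : List (List (String × List (Int × Int)))) : List (Int × List Int) :=
  ((PySem.List.enumerate rooms 0).foldl
    (fun d p => PySem.Dict.insert d p.1 (pvRoomA (pvAvail p.2)))
    PySem.Dict.empty).items

-- ===== PORT B =====
-- one step of B's sweep: state (points, cur_s, cur_e), next interval iv
def pvMergeStep (st : List Int × Int × Int) (iv : Int × Int) : List Int × Int × Int :=
  if iv.1 ≤ st.2.2 then
    (st.1, st.2.1, if st.2.2 < iv.2 then iv.2 else st.2.2)
  else
    (st.1 ++ PySem.List.pyRange st.2.1 st.2.2 1, iv.1, iv.2)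

-- B's inner body: filter degenerate intervals, sort by start, sweep
def pvRoomB (avail : List (Int × Int)) : List Int :=
  match PySem.List.sorted (avail.filter (fun iv => decide (iv.1 < iv.2))) (fun iv => iv.1) false with
  | [] => []
  | iv0 :: rest =>
    let fin := rest.foldl pvMergeStep ([], iv0.1, iv0.2)
    fin.1 ++ PySem.List.pyRange fin.2.1 fin.2.2 1

def process_room_availabilities_alt (rooms : List (List (String × List (Int × Int)))) : List (Int × List Int) :=
  ((PySem.List.enumerate rooms 0).foldl
    (fun d p => PySem.Dict.insert d p.1 (pvRoomB (pvAvail p.2)))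
    PySem.Dict.empty).items

-- ===== PRECONDITION & SPEC =====
-- Pre_ excludes only rooms without the key 'availability', on which Python A raises KeyError.
def Pre_process_room_availabilities (rooms : List (List (String × List (Int × Int)))) : Prop :=
  (rooms.all (fun room => room.any (fun p => p.1 == "availability"))) = true
instance (rooms : List (List (String × List (Int × Int)))) : Decidable (Pre_process_room_availabilities rooms) := by unfold Pre_process_room_availabilities; infer_instance

def pvWitness_process_room_availabilities : (List (List (String × List (Int × Int)))) :=
  [[("availability", [(1, 3), (3, 5), (7, 7)])], [("availability", [(-2, 1)])]]

def Spec_process_room_availabilities (rooms : List (List (String × List (Int × Int)))) (out : List (Int × List Int)) : Prop := out = process_room_availabilities_alt rooms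
instance (rooms : List (List (String × List (Int × Int)))) (out : List (Int × List Int)) : Decidable (Spec_process_room_availabilities rooms out) := by unfold Spec_process_room_availabilities; infer_instance

-- ===== CLAIM (what is proved, stated in full; the proofs are below) =====
def Claim_equal_process_room_availabilities : Prop := ∀ (rooms : List (List (String × List (Int × Int)))), Dom_process_room_availabilities rooms → Pre_process_room_availabilities rooms → Spec_process_room_availabilities rooms (process_room_availabilities rooms)

-- ===== LEMMAS AND PROOFS =====

-- recursive form of B's sweep (proof device)
def pvMergeRec (cs ce : Int) : List (Int × Int) → List Int
  | [] => PySem.List.pyRange cs ce 1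
  | iv :: rest =>
    if iv.1 ≤ ce then pvMergeRec cs (if ce < iv.2 then iv.2 else ce) rest
    else PySem.List.pyRange cs ce 1 ++ pvMergeRec iv.1 iv.2 rest

theorem pvFoldlMerge (ivs : List (Int × Int)) : ∀ (pts : List Int) (cs ce : Int),
    (ivs.foldl pvMergeStep (pts, cs, ce)).1 ++
      PySem.List.pyRange (ivs.foldl pvMergeStep (pts, cs, ce)).2.1
        (ivs.foldl pvMergeStep (pts, cs, ce)).2.2 1
      = pts ++ pvMergeRec cs ce ivs := by
  induction ivs with
  | nil => intro pts cs ce; simp [pvMergeRec]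
  | cons iv rest ih =>
    intro pts cs ce
    by_cases h : iv.1 ≤ ce
    · simp only [List.foldl_cons, pvMergeStep, if_pos h, pvMergeRec]
      exact ih pts cs _
    · simp only [List.foldl_cons, pvMergeStep, if_neg h, pvMergeRec]
      rw [ih (pts ++ PySem.List.pyRange cs ce 1) iv.1 iv.2, List.append_assoc]

theorem pvMergeRec_mem (ivs : List (Int × Int)) : ∀ (cs ce x : Int),
    (∀ iv ∈ ivs, cs ≤ iv.1) → ivs.Pairwise (fun a b => a.1 ≤ b.1) →
    (x ∈ pvMergeRec cs ce ivs ↔ (cs ≤ x ∧ x < ce) ∨ ∃ iv ∈ ivs, iv.1 ≤ x ∧ x < iv.2) := by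
  induction ivs with
  | nil => intro cs ce x _ _; simp [pvMergeRec, PySem.List.mem_pyRange_one]
  | cons iv rest ih =>
    intro cs ce x h1 h3
    have hcs : cs ≤ iv.1 := h1 iv (by simp)
    have h1' : ∀ iv' ∈ rest, cs ≤ iv'.1 := fun iv' hm => h1 iv' (List.mem_cons_of_mem _ hm)
    have hhead : ∀ iv' ∈ rest, iv.1 ≤ iv'.1 := (List.pairwise_cons.mp h3).1
    have h3' : rest.Pairwise (fun a b => a.1 ≤ b.1) := (List.pairwise_cons.mp h3).2
    by_cases h : iv.1 ≤ ce
    · rw [pvMergeRec, if_pos h, ih cs _ x h1' h3']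
      have key : (cs ≤ x ∧ x < (if ce < iv.2 then iv.2 else ce)) ↔
          (cs ≤ x ∧ x < ce) ∨ (iv.1 ≤ x ∧ x < iv.2) := by
        split_ifs with hc <;> omega
      rw [key]
      simp only [List.mem_cons]
      constructor
      · rintro (((h|h)|⟨iv',hm,hp⟩))
        · exact Or.inl h
        · exact Or.inr ⟨iv, Or.inl rfl, h⟩
        · exact Or.inr ⟨iv', Or.inr hm, hp⟩
      · rintro (h|⟨iv',(rfl|hm),hp⟩)
        · exact Or.inl (Or.inl h)
        · exact Or.inl (Or.inr hp)
        · exact Or.inr ⟨iv', hm, hp⟩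
    · rw [pvMergeRec, if_neg h]
      simp only [List.mem_append, PySem.List.mem_pyRange_one,
        ih iv.1 iv.2 x hhead h3', List.mem_cons]
      constructor
      · rintro (h|(h|⟨iv',hm,hp⟩))
        · exact Or.inl h
        · exact Or.inr ⟨iv, Or.inl rfl, h⟩
        · exact Or.inr ⟨iv', Or.inr hm, hp⟩
      · rintro (h|⟨iv',(rfl|hm),hp⟩)
        · exact Or.inl h
        · exact Or.inr (Or.inl hp)
        · exact Or.inr (Or.inr ⟨iv', hm, hp⟩)

theorem pvMergeRec_lb (ivs : List (Int × Int)) (cs ce x : Int)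
    (h1 : ∀ iv ∈ ivs, cs ≤ iv.1) (h3 : ivs.Pairwise (fun a b => a.1 ≤ b.1))
    (hx : x ∈ pvMergeRec cs ce ivs) : cs ≤ x := by
  rcases (pvMergeRec_mem ivs cs ce x h1 h3).mp hx with ⟨h, _⟩ | ⟨iv, hm, hp, _⟩
  · exact h
  · exact le_trans (h1 iv hm) hp

theorem pvMergeRec_pairwise (ivs : List (Int × Int)) : ∀ (cs ce : Int),
    (∀ iv ∈ ivs, cs ≤ iv.1) → ivs.Pairwise (fun a b => a.1 ≤ b.1) →
    (pvMergeRec cs ce ivs).Pairwise (· < ·) := by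
  induction ivs with
  | nil => intro cs ce _ _; exact PySem.List.pairwise_lt_pyRange_one cs ce
  | cons iv rest ih =>
    intro cs ce h1 h3
    have h1' : ∀ iv' ∈ rest, cs ≤ iv'.1 := fun iv' hm => h1 iv' (List.mem_cons_of_mem _ hm)
    have hhead : ∀ iv' ∈ rest, iv.1 ≤ iv'.1 := (List.pairwise_cons.mp h3).1
    have h3' : rest.Pairwise (fun a b => a.1 ≤ b.1) := (List.pairwise_cons.mp h3).2
    by_cases h : iv.1 ≤ ce
    · rw [pvMergeRec, if_pos h]; exact ih cs _ h1' h3'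
    · rw [pvMergeRec, if_neg h]
      apply List.pairwise_append.mpr
      refine ⟨PySem.List.pairwise_lt_pyRange_one cs ce, ih iv.1 iv.2 hhead h3', ?_⟩
      intro a ha b hb
      have ha' : a < ce := ((PySem.List.mem_pyRange_one).mp ha).2
      have hb' : iv.1 ≤ b := pvMergeRec_lb rest iv.1 iv.2 b hhead h3' hb
      omega

theorem pvSetFold_nodup (avail : List (Int × Int)) : ∀ (s : PySem.Set Int), s.Nodup →
    (avail.foldl (fun st iv => PySem.Set.update st (PySem.List.pyRange iv.1 iv.2 1)) s).Nodup := by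
  induction avail with
  | nil => intro s hs; exact hs
  | cons iv rest ih =>
    intro s hs
    exact ih _ (PySem.Set.nodup_update s _ hs)

theorem pvSetFold_mem (avail : List (Int × Int)) (x : Int) : ∀ (s : PySem.Set Int),
    (x ∈ avail.foldl (fun st iv => PySem.Set.update st (PySem.List.pyRange iv.1 iv.2 1)) s ↔
      x ∈ s ∨ ∃ iv ∈ avail, iv.1 ≤ x ∧ x < iv.2) := by
  induction avail with
  | nil => intro s; simp
  | cons iv rest ih =>
    intro s
    rw [List.foldl_cons, ih]
    simp only [PySem.Set.mem_update, PySem.List.mem_pyRange_one, List.mem_cons]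
    constructor
    · rintro ((h|h)|⟨iv',hm,hp⟩)
      · exact Or.inl h
      · exact Or.inr ⟨iv, Or.inl rfl, h⟩
      · exact Or.inr ⟨iv', Or.inr hm, hp⟩
    · rintro (h|⟨iv',(rfl|hm),hp⟩)
      · exact Or.inl (Or.inl h)
      · exact Or.inl (Or.inr hp)
      · exact Or.inr ⟨iv', hm, hp⟩

theorem pvRoom_eq (avail : List (Int × Int)) : pvRoomA avail = pvRoomB avail := by
  have hnodup : (avail.foldl (fun st iv => PySem.Set.update st (PySem.List.pyRange iv.1 iv.2 1)) PySem.Set.empty).Nodup :=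
    pvSetFold_nodup avail PySem.Set.empty List.nodup_nil
  have hmemS : ∀ x, x ∈ avail.foldl (fun st iv => PySem.Set.update st (PySem.List.pyRange iv.1 iv.2 1)) PySem.Set.empty ↔
      ∃ iv ∈ avail, iv.1 ≤ x ∧ x < iv.2 := by
    intro x
    rw [pvSetFold_mem]
    simp [PySem.Set.empty]
  have hpair := PySem.List.sorted_pairwise (avail.filter (fun iv => decide (iv.1 < iv.2))) (fun iv => iv.1)
  have hmemsrt : ∀ iv, iv ∈ PySem.List.sorted (avail.filter (fun iv => decide (iv.1 < iv.2))) (fun iv => iv.1) false ↔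
      iv ∈ avail.filter (fun iv => decide (iv.1 < iv.2)) := fun iv => PySem.List.mem_sorted _ _ _ _
  unfold pvRoomB
  cases hs : PySem.List.sorted (avail.filter (fun iv => decide (iv.1 < iv.2))) (fun iv => iv.1) false with
  | nil =>
    have hfl : avail.filter (fun iv => decide (iv.1 < iv.2)) = [] :=
      (PySem.List.sorted_eq_nil_iff _ _ _).mp hs
    have hnone : ∀ iv ∈ avail, ¬ iv.1 < iv.2 := by
      intro iv hm hc
      have : iv ∈ avail.filter (fun iv => decide (iv.1 < iv.2)) :=
        List.mem_filter.mpr ⟨hm, by simpa using hc⟩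
      rw [hfl] at this; exact absurd this (List.not_mem_nil)
    have hSnil : avail.foldl (fun st iv => PySem.Set.update st (PySem.List.pyRange iv.1 iv.2 1)) PySem.Set.empty = [] := by
      apply List.eq_nil_iff_forall_not_mem.mpr
      intro x hx
      rcases (hmemS x).mp hx with ⟨iv, hm, hp1, hp2⟩
      exact hnone iv hm (lt_of_le_of_lt hp1 hp2)
    unfold pvRoomA
    rw [hSnil]
    rfl
  | cons iv0 rest =>
    have hpair' : (iv0 :: rest).Pairwise (fun a b : Int × Int => a.1 ≤ b.1) := by
      rw [← hs]; exact hpair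
    have hhead : ∀ iv ∈ rest, iv0.1 ≤ iv.1 := (List.pairwise_cons.mp hpair').1
    have h3' : rest.Pairwise (fun a b : Int × Int => a.1 ≤ b.1) := (List.pairwise_cons.mp hpair').2
    simp only []
    rw [pvFoldlMerge rest [] iv0.1 iv0.2, List.nil_append]
    unfold pvRoomA
    apply PySem.List.sorted_eq_of_perm_of_pairwise_lt
    · apply (List.perm_ext_iff_of_nodup ?_ hnodup).mpr
      · intro x
        rw [hmemS x, pvMergeRec_mem rest iv0.1 iv0.2 x hhead h3']
        have hmemAll : ∀ iv : Int × Int, iv ∈ iv0 :: rest ↔ iv ∈ avail ∧ iv.1 < iv.2 := by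
          intro iv
          rw [← hs, hmemsrt iv, List.mem_filter]
          simp
        constructor
        · rintro (h | ⟨iv, hm, hp⟩)
          · exact ⟨iv0, ((hmemAll iv0).mp (by simp)).1, h⟩
          · exact ⟨iv, ((hmemAll iv).mp (List.mem_cons_of_mem _ hm)).1, hp⟩
        · rintro ⟨iv, hm, hp1, hp2⟩
          have : iv ∈ iv0 :: rest := (hmemAll iv).mpr ⟨hm, lt_of_le_of_lt hp1 hp2⟩
          rcases List.mem_cons.mp this with rfl | hm'
          · exact Or.inl ⟨hp1, hp2⟩
          · exact Or.inr ⟨iv, hm', hp1, hp2⟩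
      · exact List.Pairwise.imp (fun h => Int.ne_of_lt h)
          (pvMergeRec_pairwise rest iv0.1 iv0.2 hhead h3')
    · exact pvMergeRec_pairwise rest iv0.1 iv0.2 hhead h3'

-- ===== VERDICT (by name: the statement is the Claim_ definition above) =====
theorem process_room_availabilities_spec : Claim_equal_process_room_availabilities := by
  intro rooms _ _
  unfold Spec_process_room_availabilities
  unfold process_room_availabilities process_room_availabilities_alt
  have : (fun (d : PySem.Dict Int (List Int)) (p : Int × List (String × List (Int × Int))) =>
      PySem.Dict.insert d p.1 (pvRoomA (pvAvail p.2))) =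
      (fun d p => PySem.Dict.insert d p.1 (pvRoomB (pvAvail p.2))) := by
    funext d p
    rw [pvRoom_eq]
  rw [this]
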